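-- pv_equiv track=rewrite | github.com/RuslanKulynych/python_tasks | task_4.py | extract_last_words
-- ===== SOURCE A (Python) =====
-- def extract_last_words(text):
--     """Return list of last words from each sentence."""
--     last_words, word = [], ""
--     for i, ch in enumerate(text):
--         if ch.isalpha():
--             word += ch
--         else:
--             if word:
--                 if ch in ".!?":
--                     last_words.append(word)
--                 word = ""
--     if word:
--         last_words.append(word)
--     return last_words
-- ===== SOURCE B (Python) =====
-- def extract_last_words(text):
--     """Return list of last words from each sentence."""
--     out, i, n = [], 0, len(text)
--     while i < n:
--         if text[i].isalpha():
--             j = i + 1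
--             while j < n and text[j].isalpha():
--                 j += 1
--             if j == n or text[j] in ".!?":
--                 out.append(text[i:j])
--             i = j
--         else:
--             i += 1
--     return out
-- ===== Notes on version B (the rewrite author's own statement) =====
-- stated objective: alternative
-- what changed: B scans by index, extracting each maximal alphabetic run as a slice and keeping it iff the text ends there or the next character is a sentence terminator, instead of A's character-by-character accumulator with reset-on-delimiter state.
import Mathlib
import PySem

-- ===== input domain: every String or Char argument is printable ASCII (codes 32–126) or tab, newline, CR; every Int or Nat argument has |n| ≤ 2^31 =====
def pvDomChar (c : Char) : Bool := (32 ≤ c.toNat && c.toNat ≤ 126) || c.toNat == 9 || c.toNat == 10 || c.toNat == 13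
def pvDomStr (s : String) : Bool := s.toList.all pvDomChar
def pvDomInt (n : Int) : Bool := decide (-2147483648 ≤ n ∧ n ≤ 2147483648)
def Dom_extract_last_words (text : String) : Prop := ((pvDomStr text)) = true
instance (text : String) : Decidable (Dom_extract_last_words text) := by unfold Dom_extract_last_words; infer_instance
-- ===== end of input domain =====

-- B scans maximal alphabetic runs and keeps each iff followed by a sentence terminator (or the end),
-- instead of A's character accumulator with reset-on-delimiter state; alternative decomposition, same result.


-- ===== PORT A =====
-- one step of A's for-loop: state = (last_words, word)
def pvStepA (st : List String × List Char) (ch : Char) : List String × List Char :=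
  if PySem.Chars.isalpha ch then (st.1, st.2 ++ [ch])
  else if st.2.isEmpty then st
  else ((if ['.', '!', '?'].contains ch then st.1 ++ [String.ofList st.2] else st.1), [])

def extract_last_words (text : String) : List String :=
  let st := text.toList.foldl pvStepA ([], [])
  if st.2.isEmpty then st.1 else st.1 ++ [String.ofList st.2]

-- ===== PORT B =====
-- B's "keep the run?" test: keep a finished run iff the text ended or a sentence-terminator char follows
def pvEmit (run : List Char) (rest : List Char) : List String :=
  match rest with
  | [] => [String.ofList run]
  | d :: _ => if ['.', '!', '?'].contains d then [String.ofList run] else []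

-- B's outer scan: skip non-alpha chars; at an alpha char take the whole maximal run (inner while)
def pvGoB : List Char → List String
  | [] => []
  | c :: cs =>
    if PySem.Chars.isalpha c then
      pvEmit (c :: cs.takeWhile PySem.Chars.isalpha) (cs.dropWhile PySem.Chars.isalpha)
        ++ pvGoB (cs.dropWhile PySem.Chars.isalpha)
    else pvGoB cs
  termination_by l => l.length
  decreasing_by
  · exact Nat.lt_succ_of_le (List.length_dropWhile_le _ _)
  · exact Nat.lt_succ_of_le (Nat.le_refl _)

def extract_last_words_alt (text : String) : List String := pvGoB text.toList

-- ===== PRECONDITION & SPEC =====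
def Spec_extract_last_words (text : String) (out : List String) : Prop := out = extract_last_words_alt text
instance (text : String) (out : List String) : Decidable (Spec_extract_last_words text out) := by unfold Spec_extract_last_words; infer_instance

-- ===== CLAIM (what is proved, stated in full; the proofs are below) =====
def Claim_equal_extract_last_words : Prop := ∀ (text : String), Dom_extract_last_words text → Spec_extract_last_words text (extract_last_words text)

-- ===== LEMMAS AND PROOFS =====

-- A's post-loop flush
def pvFin (st : List String × List Char) : List String :=
  if st.2.isEmpty then st.1 else st.1 ++ [String.ofList st.2]

-- what A will still produce from the rest of the text when the current word is w
def pvK (w : List Char) (cs : List Char) : List String :=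
  if w = [] then pvGoB cs
  else pvEmit (w ++ cs.takeWhile PySem.Chars.isalpha) (cs.dropWhile PySem.Chars.isalpha)
         ++ pvGoB (cs.dropWhile PySem.Chars.isalpha)

theorem pvK_alpha (w : List Char) (c : Char) (cs : List Char)
    (h : PySem.Chars.isalpha c = true) : pvK w (c :: cs) = pvK (w ++ [c]) cs := by
  unfold pvK
  rcases eq_or_ne w [] with hw | hw
  · subst hw
    simp [pvGoB, h]
  · simp [hw, List.takeWhile, List.dropWhile, h]

theorem pvLoop (cs : List Char) : ∀ (lw : List String) (w : List Char),
    pvFin (cs.foldl pvStepA (lw, w)) = lw ++ pvK w cs := by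
  induction cs with
  | nil =>
    intro lw w
    rcases eq_or_ne w [] with hw | hw <;>
      simp [pvFin, pvK, pvGoB, pvEmit, hw, List.isEmpty_iff]
  | cons c cs ih =>
    intro lw w
    by_cases h : PySem.Chars.isalpha c = true
    · rw [List.foldl_cons]
      have hstep : pvStepA (lw, w) c = (lw, w ++ [c]) := by simp [pvStepA, h]
      rw [hstep, ih, pvK_alpha w c cs h]
    · rw [List.foldl_cons]
      rcases eq_or_ne w [] with hw | hw
      · subst hw
        have hstep : pvStepA (lw, ([] : List Char)) c = (lw, []) := by
          simp [pvStepA, h]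
        rw [hstep, ih]
        simp [pvK, pvGoB, h]
      · have hstep : pvStepA (lw, w) c =
            ((if ['.', '!', '?'].contains c then lw ++ [String.ofList w] else lw), []) := by
          simp [pvStepA, h, List.isEmpty_iff, hw]
        rw [hstep, ih]
        simp only [pvK, hw, if_false]
        have htw : (c :: cs).takeWhile PySem.Chars.isalpha = [] := by
          simp [List.takeWhile, h]
        have hdw : (c :: cs).dropWhile PySem.Chars.isalpha = c :: cs := by
          simp [List.dropWhile, h]
        rw [htw, hdw]
        simp only [List.append_nil, pvEmit]
        have hskip : pvGoB (c :: cs) = pvGoB cs := by rw [pvGoB]; simp [h]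
        rw [hskip]
        split_ifs with hc <;> simp [List.append_assoc]

-- ===== VERDICT (by name: the statement is the Claim_ definition above) =====
theorem extract_last_words_spec : Claim_equal_extract_last_words := by
  intro text _
  unfold Spec_extract_last_words extract_last_words extract_last_words_alt
  have := pvLoop text.toList [] []
  simpa [pvFin, pvK] using this
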